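-- pv_equiv track=rewrite | github.com/kaikiat/server | sample.py | process_tablet_data
-- ===== SOURCE A (Python) =====
-- def process_tablet_data(data):
--     """ Makes 'ns000nw020' to '["ns000","nw020"]', formulating to list """
--     preprocessed_data = data.split("n")
--     preprocessed_data = ["n" + value for value in preprocessed_data]
--     if data[0] != "n":
--         preprocessed_data[0] = preprocessed_data[0][1:]
--     else:
--         preprocessed_data.pop(0)
--     processed_data = [instr_or_pos.strip() for instr_or_pos in preprocessed_data]
--     return processed_data
-- ===== SOURCE B (Python) =====
-- def process_tablet_data(data):
--     """Single-pass scan: build the tokens directly instead of split-then-patch."""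
--     tokens = []
--     cur = ""
--     for c in data:
--         if c == "n":
--             tokens.append(cur)
--             cur = "n"
--         else:
--             cur += c
--     tokens.append(cur)
--     if data[0] == "n":
--         tokens = tokens[1:]
--     return [t.strip() for t in tokens]
-- ===== Notes on version B (the rewrite author's own statement) =====
-- stated objective: alternative
-- what changed: Replaces split on the separator followed by re-prefixing every piece and patching/popping the first element with a single character scan that builds the final tokens directly.
import Mathlib
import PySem

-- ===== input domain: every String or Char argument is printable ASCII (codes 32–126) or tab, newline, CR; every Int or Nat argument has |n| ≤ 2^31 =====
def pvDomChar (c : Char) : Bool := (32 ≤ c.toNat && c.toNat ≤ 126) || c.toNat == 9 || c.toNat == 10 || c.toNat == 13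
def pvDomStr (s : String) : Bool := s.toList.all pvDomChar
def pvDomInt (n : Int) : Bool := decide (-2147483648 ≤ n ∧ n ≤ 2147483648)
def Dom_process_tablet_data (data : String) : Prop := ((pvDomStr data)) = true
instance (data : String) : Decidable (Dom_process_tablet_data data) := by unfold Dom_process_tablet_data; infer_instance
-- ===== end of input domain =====

-- B replaces split('n') + re-prefix + patch/pop of the first element by one character scan
-- building the tokens directly (objective: alternative decomposition, same cost).

-- ===== PORT A =====
-- strings are carried as List Char (PySem.Chars is the exact model); String.mk wraps at the end
def process_tablet_data (data : String) : List String :=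
  let preprocessed := PySem.Chars.splitOn data.toList ['n']
  let preprocessed := preprocessed.map (fun v => 'n' :: v)
  let preprocessed2 :=
    match PySem.List.pyGet? data.toList 0 with
    | none => []   -- data[0] raises IndexError on empty data; excluded by Pre_
    | some c =>
      if c ≠ 'n' then
        PySem.List.pySetD preprocessed 0
          (PySem.List.slice (PySem.List.pyGetD preprocessed 0 []) (some 1) none)
      else
        ((PySem.List.pop? preprocessed 0).map Prod.snd).getD preprocessed
  preprocessed2.map (fun t => String.ofList (PySem.Chars.strip t))

-- ===== PORT B =====
def process_tablet_data_alt (data : String) : List String :=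
  let r := data.toList.foldl
    (fun (st : List (List Char) × List Char) c =>
      if c = 'n' then (st.1 ++ [st.2], ['n']) else (st.1, st.2 ++ [c]))
    ([], [])
  let tokens := r.1 ++ [r.2]
  let tokens :=
    match PySem.List.pyGet? data.toList 0 with
    | none => []   -- data[0] raises IndexError on empty data; excluded by Pre_
    | some c => if c = 'n' then PySem.List.slice tokens (some 1) none else tokens
  tokens.map (fun t => String.ofList (PySem.Chars.strip t))

-- ===== PRECONDITION & SPEC =====
-- A evaluates data[0], so the empty string raises IndexError; it is the only excluded input.
def Pre_process_tablet_data (data : String) : Prop := data ≠ ""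
instance (data : String) : Decidable (Pre_process_tablet_data data) := by
  unfold Pre_process_tablet_data; infer_instance
def pvWitness_process_tablet_data : String := "ns000nw020"

def Spec_process_tablet_data (data : String) (out : List String) : Prop :=
  out = process_tablet_data_alt data
instance (data : String) (out : List String) : Decidable (Spec_process_tablet_data data out) := by
  unfold Spec_process_tablet_data; infer_instance

-- ===== CLAIM (what is proved, stated in full; the proofs are below) =====
def Claim_equal_process_tablet_data : Prop :=
  ∀ (data : String), Dom_process_tablet_data data → Pre_process_tablet_data data →
    Spec_process_tablet_data data (process_tablet_data data)

-- ===== LEMMAS AND PROOFS =====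

-- reference recursion: split a char list on 'n' with the accumulated prefix `pre`
def pvSplit1 (pre : List Char) : List Char → List (List Char)
  | [] => [pre]
  | c :: r => if c = 'n' then pre :: pvSplit1 [] r else pvSplit1 (pre ++ [c]) r

theorem pvSplit1_ne_nil (pre : List Char) (l : List Char) : pvSplit1 pre l ≠ [] := by
  induction l generalizing pre with
  | nil => simp [pvSplit1]
  | cons c r ih =>
    simp only [pvSplit1]
    split_ifs
    · simp
    · exact ih _

theorem pvSplit1_append (a : List Char) (l : List Char) (pre : List Char) :
    pvSplit1 (a ++ pre) l = (a ++ (pvSplit1 pre l).headI) :: (pvSplit1 pre l).tail := by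
  induction l generalizing pre with
  | nil => simp [pvSplit1]
  | cons c r ih =>
    simp only [pvSplit1]
    split_ifs with h
    · simp
    · rw [show a ++ pre ++ [c] = a ++ (pre ++ [c]) by simp, ih]

theorem pvGo_spec (fuel : Nat) (l cur : List Char) (acc : List (List Char))
    (h : l.length < fuel) :
    PySem.Chars.splitOn.go ['n'] fuel l cur acc = acc.reverse ++ pvSplit1 cur.reverse l := by
  induction fuel generalizing l cur acc with
  | zero => omega
  | succ fuel ih =>
    cases l with
    | nil => simp [PySem.Chars.splitOn.go, pvSplit1]
    | cons c rest =>
      rw [PySem.Chars.splitOn.go]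
      by_cases hc : c = 'n'
      · subst hc
        have hp : List.isPrefixOf ['n'] ('n' :: rest) = true := by
          simp [List.isPrefixOf]
        rw [if_pos hp]
        have : rest.length < fuel := by simpa using Nat.lt_of_succ_lt_succ h
        rw [show List.drop (['n'].length) ('n' :: rest) = rest from rfl, ih _ _ _ this]
        simp [pvSplit1]
      · have hp : List.isPrefixOf ['n'] (c :: rest) = false := by
          simp [List.isPrefixOf, (Ne.symm hc : 'n' ≠ c)]
        rw [if_neg (by simp [hp])]
        have : rest.length < fuel := by simpa using Nat.lt_of_succ_lt_succ h
        rw [ih _ _ _ this]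
        simp [pvSplit1, hc]

theorem pvSplitOn_eq (cs : List Char) :
    PySem.Chars.splitOn cs ['n'] = pvSplit1 [] cs := by
  unfold PySem.Chars.splitOn
  rw [pvGo_spec _ _ _ _ (by omega)]
  simp

-- the scan of B produces the first raw piece followed by the 'n'-prefixed remaining pieces
theorem pvScan_spec (cs : List Char) (toks : List (List Char)) (pre : List Char) :
    (cs.foldl (fun (st : List (List Char) × List Char) c =>
        if c = 'n' then (st.1 ++ [st.2], ['n']) else (st.1, st.2 ++ [c])) (toks, pre)).1
      ++ [(cs.foldl (fun (st : List (List Char) × List Char) c =>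
        if c = 'n' then (st.1 ++ [st.2], ['n']) else (st.1, st.2 ++ [c])) (toks, pre)).2]
    = toks ++ (pvSplit1 pre cs).headI :: (pvSplit1 pre cs).tail.map ('n' :: ·) := by
  induction cs generalizing toks pre with
  | nil => simp [pvSplit1]
  | cons c r ih =>
    simp only [List.foldl_cons]
    by_cases hc : c = 'n'
    · subst hc
      rw [if_pos rfl, ih]
      obtain ⟨h0, t0, hsp⟩ := List.exists_cons_of_ne_nil (pvSplit1_ne_nil ([] : List Char) r)
      have hmt := pvSplit1_append ['n'] r []
      simp only [List.append_nil, hsp] at hmt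
      simp [pvSplit1, hmt, hsp]
    · rw [if_neg (by simp [hc]), ih]
      simp [pvSplit1, hc]

theorem process_tablet_data_eq_alt (data : String) (h : data ≠ "") :
    process_tablet_data data = process_tablet_data_alt data := by
  unfold process_tablet_data process_tablet_data_alt
  have hnil : data.toList ≠ [] := by
    simpa [String.toList_eq_nil_iff] using h
  obtain ⟨c, rest, hcs⟩ := List.exists_cons_of_ne_nil hnil
  rw [hcs]
  have hget : PySem.List.pyGet? (c :: rest) (0 : Int) = some c := by
    simp [PySem.List.pyGet?, PySem.List.pyIdx?]
  simp only [hget, pvSplitOn_eq]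
  rw [pvScan_spec]
  obtain ⟨h0, t0, hsp⟩ : ∃ h0 t0, pvSplit1 [] rest = h0 :: t0 := by
    cases hx : pvSplit1 ([] : List Char) rest with
    | nil => exact absurd hx (pvSplit1_ne_nil _ _)
    | cons h0 t0 => exact ⟨h0, t0, rfl⟩
  by_cases hc : c = 'n'
  · subst hc
    simp only [pvSplit1, hsp]
    have hlen : (0:Int) ≤ ↑t0.length + 1 := by positivity
    norm_num [PySem.List.pop?, PySem.List.pyIdx?, hlen, List.eraseIdx, Function.comp,
      PySem.List.slice_from_one]
  · simp only [pvSplit1, if_neg hc]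
    have := pvSplit1_append [c] rest []
    simp only [List.append_nil, hsp] at this
    norm_num [this, hc, PySem.List.pySetD, PySem.List.pySet?, PySem.List.pyIdx?, Function.comp,
      PySem.List.slice_from_one]

-- ===== VERDICT (by name: the statement is the Claim_ definition above) =====
theorem process_tablet_data_spec : Claim_equal_process_tablet_data := by
  intro data _ hpre
  unfold Spec_process_tablet_data
  exact process_tablet_data_eq_alt data hpre
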